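-- pv_equiv track=rewrite | github.com/james-menzies/nudge | display_utils.py | render_columns
-- ===== SOURCE A (Python) =====
-- def render_columns(columns):
--     max_rows = 0
--
--     result = ""
--
--     for index, column in enumerate(columns):
--
--         column = str(column)
--         column = column.split(sep="\n")
--
--         columns[index] = column
--         if len(column) > max_rows:
--             max_rows = len(column)
--
--     for i in range(0, max_rows):
--         for column in columns:
--             if i >= len(column):
--                 line_str = ""
--             else:
--                 line_str = column[i]
--
--             result += "{0:30}".format(line_str)
--         result += "\n"
--
--     return result
-- ===== SOURCE B (Python) =====
-- def _transpose_longest(cols):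
--     rows = []
--     while any(cols):
--         rows.append([c[0] if c else "" for c in cols])
--         cols = [c[1:] for c in cols]
--     return rows
--
--
-- def render_columns(columns):
--     for index, column in enumerate(columns):
--         columns[index] = str(column).split(sep="\n")
--     return "".join(
--         "".join("{0:30}".format(cell) for cell in row) + "\n"
--         for row in _transpose_longest(columns)
--     )
-- ===== Notes on version B (the rewrite author's own statement) =====
-- stated objective: idiomatic
-- what changed: Replaces the max_rows counter and index-based row loop with bounds checks by a zip_longest-style transpose of the split columns, then joins the padded cells row by row.
import Mathlib
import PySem

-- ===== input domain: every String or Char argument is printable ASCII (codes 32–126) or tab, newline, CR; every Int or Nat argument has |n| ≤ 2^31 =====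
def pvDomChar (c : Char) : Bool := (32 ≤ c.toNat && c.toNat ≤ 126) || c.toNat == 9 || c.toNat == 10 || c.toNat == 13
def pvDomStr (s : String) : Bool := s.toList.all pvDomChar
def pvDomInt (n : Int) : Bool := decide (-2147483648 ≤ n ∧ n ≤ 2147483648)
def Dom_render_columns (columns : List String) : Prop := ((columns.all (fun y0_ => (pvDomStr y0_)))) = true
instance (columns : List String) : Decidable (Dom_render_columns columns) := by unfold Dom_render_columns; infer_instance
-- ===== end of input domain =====

-- B replaces A's max_rows counter and index loop with a zip_longest-style transpose (idiomatic decomposition);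
-- A mutates its argument in place (columns[index] = …); the equivalence proved here is about the RETURN value only.

-- s.split CHR sep="\n" (sep nonempty): PySem.Chars.splitOn lifted to String (shared by both ports)
def pySplitNL (s : String) : List String :=
  (PySem.Chars.splitOn s.toList ['\n']).map String.ofList

-- "{0:30}".format(s): left-justify to width 30 with spaces (shared formatting helper of both programs)
def pyFmt30 (s : String) : String :=
  s ++ String.ofList (List.replicate (30 - s.toList.length) ' ')

-- ===== PORT A =====
def render_columns (columns : List String) : String :=
  -- first loop: replace each column by its '\n'-split, tracking max_rows
  let st := columns.foldl
      (fun (acc : List (List String) × Int) column =>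
        let col := pySplitNL column
        (acc.1 ++ [col],
         if ((col.length : Int)) > acc.2 then (col.length : Int) else acc.2))
      ([], 0)
  -- second loop: for i in range(0, max_rows): for column in columns: …
  (PySem.List.pyRange 0 st.2 1).foldl
    (fun result i =>
      (st.1.foldl
        (fun r column =>
          let line_str : String :=
            if i ≥ ((column.length : Int)) then "" else (PySem.List.pyGet? column i).getD ""
          r ++ pyFmt30 line_str)
        result) ++ "\n")
    ""

-- ===== PORT B =====
-- termination helper for the transpose's while loop (total split length strictly shrinks)
def pvSumLen (cols : List (List String)) : Nat := (cols.map List.length).sum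

theorem pvSumLen_drop_le (cols : List (List String)) :
    pvSumLen (cols.map (fun c => c.drop 1)) ≤ pvSumLen cols := by
  induction cols with
  | nil => simp [pvSumLen]
  | cons c cs ih =>
    simp only [pvSumLen, List.map_cons, List.sum_cons] at *
    have := c.length_drop (i := 1)
    omega

theorem pvSumLen_drop_lt (cols : List (List String))
    (h : cols.any (fun c => !c.isEmpty) = true) :
    pvSumLen (cols.map (fun c => c.drop 1)) < pvSumLen cols := by
  induction cols with
  | nil => simp at h
  | cons c cs ih =>
    simp only [List.any_cons, Bool.or_eq_true] at h
    simp only [pvSumLen, List.map_cons, List.sum_cons]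
    rcases h with h | h
    · have hc : c ≠ [] := by
        intro hc; subst hc; simp at h
      have h1 : (c.drop 1).length < c.length := by
        have := c.length_drop (i := 1)
        have : c.length ≠ 0 := by simpa using hc
        have := c.length_drop (i := 1); omega
      have := pvSumLen_drop_le cs
      simp only [pvSumLen] at this
      omega
    · have := ih h
      simp only [pvSumLen] at this
      have := c.length_drop (i := 1)
      omega

-- while any(cols): emit heads, drop heads
def pvTransposeLongest (cols : List (List String)) : List (List String) :=
  if h : cols.any (fun c => !c.isEmpty) = true then
    (cols.map (fun c => c.headD "")) :: pvTransposeLongest (cols.map (fun c => c.drop 1))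
  else []
termination_by pvSumLen cols
decreasing_by simpa using pvSumLen_drop_lt cols h

def render_columns_alt (columns : List String) : String :=
  let cols := columns.map (fun column => pySplitNL column)
  PySem.Str.join ""
    ((pvTransposeLongest cols).map
      (fun row => PySem.Str.join "" (row.map pyFmt30) ++ "\n"))

-- ===== PRECONDITION & SPEC =====
def Spec_render_columns (columns : List String) (out : String) : Prop := out = render_columns_alt columns
instance (columns : List String) (out : String) : Decidable (Spec_render_columns columns out) := by unfold Spec_render_columns; infer_instance

-- ===== CLAIM (what is proved, stated in full; the proofs are below) =====
def Claim_equal_render_columns : Prop := ∀ (columns : List String), Dom_render_columns columns → Spec_render_columns columns (render_columns columns)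

-- ===== LEMMAS AND PROOFS =====

-- the maximum number of rows of any column
def pvMaxLen (cols : List (List String)) : Nat := cols.foldr (fun c m => max c.length m) 0

theorem strJoin_cons (x : String) (l : List String) :
    PySem.Str.join "" (x :: l) = x ++ PySem.Str.join "" l := by
  apply String.toList_inj.mp
  cases l with
  | nil =>
    simp [PySem.Str.toList_join, PySem.Chars.join_singleton, PySem.Chars.join_nil]
  | cons y l =>
    simp [PySem.Str.toList_join, PySem.Chars.join_cons_cons]

-- a Python 'result += g(x)' loop is init ++ "".join(map g)
theorem foldl_strAppend {α : Type} (g : α → String) :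
    ∀ (l : List α) (init : String),
      l.foldl (fun r x => r ++ g x) init = init ++ PySem.Str.join "" (l.map g) := by
  intro l
  induction l with
  | nil =>
    intro init
    have h0 : PySem.Str.join "" ([] : List String) = "" := by decide
    simp [h0, String.append_empty]
  | cons x l ih =>
    intro init
    simp only [List.foldl_cons, List.map_cons, strJoin_cons]
    rw [ih, String.append_assoc]

-- A's first loop: builds the split columns and max_rows
theorem foldA_eq :
    ∀ (columns : List String) (l : List (List String)) (m : Int), 0 ≤ m →
      columns.foldl
        (fun (acc : List (List String) × Int) column =>
          let col := pySplitNL column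
          (acc.1 ++ [col],
           if ((col.length : Int)) > acc.2 then (col.length : Int) else acc.2))
        (l, m)
      = (l ++ columns.map pySplitNL, max m (pvMaxLen (columns.map pySplitNL) : Int)) := by
  intro columns
  induction columns with
  | nil =>
    intro l m hm
    simp only [List.foldl_nil, List.map_nil, List.append_nil, pvMaxLen, List.foldr_nil,
      Nat.cast_zero, Prod.mk.injEq]
    exact ⟨trivial, by omega⟩
  | cons c cs ih =>
    intro l m hm
    simp only [List.foldl_cons, List.map_cons]
    rw [ih (l ++ [pySplitNL c])
        (if ((pySplitNL c).length : Int) > m then ((pySplitNL c).length : Int) else m)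
        (by split_ifs <;> omega)]
    simp only [Prod.mk.injEq]
    refine ⟨by simp, ?_⟩
    have h1 : pvMaxLen (pySplitNL c :: cs.map pySplitNL)
        = max (pySplitNL c).length (pvMaxLen (cs.map pySplitNL)) := rfl
    rw [h1]
    push_cast [Nat.cast_max]
    split_ifs <;> omega

-- A's cell expression equals getD
theorem cellA_eq (c : List String) (k : Nat) :
    (if ((k : Int)) ≥ ((c.length : Int)) then ""
     else (PySem.List.pyGet? c ((k : Int))).getD "") = c.getD k "" := by
  by_cases h : k < c.length
  · rw [if_neg (by omega)]
    rw [PySem.List.pyGet?_natCast]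
    simp [List.getD]
  · rw [if_pos (by omega)]
    rw [List.getD_eq_getElem?_getD, List.getElem?_eq_none (by omega)]
    rfl

theorem getD_zero_headD (c : List String) : c.getD 0 "" = c.headD "" := by
  cases c <;> simp [List.getD]

theorem getD_succ_drop (c : List String) (k : Nat) :
    c.getD (k + 1) "" = (c.drop 1).getD k "" := by
  cases c <;> simp [List.getD]

theorem pvMaxLen_drop (cols : List (List String)) :
    pvMaxLen (cols.map (fun c => c.drop 1)) = pvMaxLen cols - 1 := by
  induction cols with
  | nil => simp [pvMaxLen]
  | cons c cs ih =>
    have h1 : pvMaxLen ((c :: cs).map (fun c => c.drop 1))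
        = max (c.drop 1).length (pvMaxLen (cs.map (fun c => c.drop 1))) := rfl
    have h2 : pvMaxLen (c :: cs) = max c.length (pvMaxLen cs) := rfl
    rw [h1, h2, ih]
    have := c.length_drop (i := 1)
    omega

theorem pvMaxLen_pos (cols : List (List String))
    (h : cols.any (fun c => !c.isEmpty) = true) : 0 < pvMaxLen cols := by
  induction cols with
  | nil => simp at h
  | cons c cs ih =>
    have h2 : pvMaxLen (c :: cs) = max c.length (pvMaxLen cs) := rfl
    simp only [List.any_cons, Bool.or_eq_true] at h
    rcases h with h | h
    · have : c ≠ [] := by intro hc; subst hc; simp at h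
      have : c.length ≠ 0 := by simpa using this
      omega
    · have := ih h
      omega

theorem pvMaxLen_zero (cols : List (List String))
    (h : ¬ cols.any (fun c => !c.isEmpty) = true) : pvMaxLen cols = 0 := by
  induction cols with
  | nil => rfl
  | cons c cs ih =>
    simp only [List.any_cons, Bool.or_eq_true, not_or] at h
    have hc : c = [] := by
      rcases h with ⟨h1, _⟩
      cases c with
      | nil => rfl
      | cons a as => simp at h1
    subst hc
    have h2 : pvMaxLen ([] :: cs) = max ([] : List String).length (pvMaxLen cs) := rfl
    rw [h2, ih (by simpa using h.2)]
    simp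

-- the transpose is the table of rows 0 .. maxLen-1
theorem transpose_eq_aux :
    ∀ (n : Nat) (cols : List (List String)), pvMaxLen cols = n →
      pvTransposeLongest cols
        = (List.range n).map (fun k => cols.map (fun c => c.getD k "")) := by
  intro n
  induction n with
  | zero =>
    intro cols hM
    have hg : ¬ cols.any (fun c => !c.isEmpty) = true := by
      intro h
      have := pvMaxLen_pos cols h
      omega
    rw [pvTransposeLongest, dif_neg hg]
    simp
  | succ n ih =>
    intro cols hM
    have hg : cols.any (fun c => !c.isEmpty) = true := by
      by_contra h
      have := pvMaxLen_zero cols h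
      omega
    rw [pvTransposeLongest, dif_pos hg]
    have htail : pvMaxLen (cols.map (fun c => c.drop 1)) = n := by
      have := pvMaxLen_drop cols
      omega
    rw [ih _ htail, List.range_succ_eq_map, List.map_cons, List.map_map]
    refine List.cons_eq_cons.mpr ⟨?_, ?_⟩
    · apply List.map_congr_left
      intro c _
      exact (getD_zero_headD c).symm
    · apply List.map_congr_left
      intro k _
      simp only [Function.comp_apply, List.map_map]
      apply List.map_congr_left
      intro c _
      exact (getD_succ_drop c k).symm

-- ===== VERDICT (by name: the statement is the Claim_ definition above) =====
theorem render_columns_spec : Claim_equal_render_columns := by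
  intro columns _
  show render_columns columns = render_columns_alt columns
  unfold render_columns render_columns_alt
  rw [foldA_eq columns [] 0 (by omega)]
  simp only [List.nil_append]
  set cols := columns.map pySplitNL with hcols
  set n := pvMaxLen cols with hn
  have hmax : max (0 : Int) (n : Int) = (n : Int) := by omega
  rw [hmax]
  rw [PySem.List.pyRange_zero_natCast, List.foldl_map]
  -- rewrite the loop body to the canonical row form
  have hbody :
      (fun (result : String) (k : Nat) =>
        (cols.foldl
          (fun r column =>
            r ++ pyFmt30 (if ((k : Int)) ≥ ((column.length : Int)) then ""
              else (PySem.List.pyGet? column ((k : Int))).getD "")) result) ++ "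
")
      = (fun (result : String) (k : Nat) =>
          result ++ (PySem.Str.join "" (cols.map (fun c => pyFmt30 (c.getD k ""))) ++ "
")) := by
    funext result k
    have hcell : (fun (r : String) (column : List String) =>
        r ++ pyFmt30 (if ((k : Int)) ≥ ((column.length : Int)) then ""
          else (PySem.List.pyGet? column ((k : Int))).getD ""))
        = (fun (r : String) (column : List String) => r ++ pyFmt30 (column.getD k "")) := by
      funext r column
      rw [cellA_eq]
    rw [hcell, foldl_strAppend (fun c => pyFmt30 (c.getD k "")) cols result, List.map_map,
      String.append_assoc]
  rw [hbody]
  rw [foldl_strAppend (fun k => PySem.Str.join "" (cols.map (fun c => pyFmt30 (c.getD k ""))) ++ "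
") (List.range n) ""]
  rw [String.empty_append]
  rw [transpose_eq_aux n cols hn.symm, List.map_map]
  congr 1
  apply List.map_congr_left
  intro k _
  simp only [List.map_map, Function.comp_def]
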